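-- pv_equiv track=rewrite | github.com/chuotgia3011/AI-TAKI | EditText/split_sentences.py | split_sentences
-- ===== SOURCE A (Python) =====
-- def split_sentences(text, max_words=7, min_words=2):
--     sentences = text.split('.')
--     result = []
--
--     for sentence in sentences:
--         words = sentence.strip().split()
--         if not words:
--             continue
--         current_sentence = []
--         for word in words:
--             current_sentence.append(word)
--             if len(current_sentence) == max_words:
--                 result.append(" ".join(current_sentence).strip())
--                 current_sentence = []
--         if current_sentence and len(current_sentence) >= min_words:
--             result.append(" ".join(current_sentence).strip())
--
--     # Loại bỏ các khoảng trống không cần thiết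
--     result = [sent.strip() + "." if text.endswith(".") else sent.strip() for sent in result]
--
--     return result
-- ===== SOURCE B (Python) =====
-- def split_sentences(text, max_words=7, min_words=2):
--     suffix = "." if text.endswith(".") else ""
--     result = []
--     for sentence in text.split('.'):
--         words = sentence.split()
--         if not words:
--             continue
--         if max_words > 0:
--             chunks = [words[i:i + max_words] for i in range(0, len(words), max_words)]
--         else:
--             chunks = [words]
--         result.extend(" ".join(c) + suffix
--                       for c in chunks
--                       if len(c) == max_words or len(c) >= min_words)
--     return result
-- ===== Notes on version B (the rewrite author's own statement) =====
-- stated objective: simpler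
-- what changed: Replaces A's stateful accumulate-and-flush inner loop and the separate final strip-and-append-period pass with slice-based chunking (words[i:i+max_words], one chunk for max_words<=0) filtered by chunk length, the period suffix computed once and attached at join time.
import Mathlib
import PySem

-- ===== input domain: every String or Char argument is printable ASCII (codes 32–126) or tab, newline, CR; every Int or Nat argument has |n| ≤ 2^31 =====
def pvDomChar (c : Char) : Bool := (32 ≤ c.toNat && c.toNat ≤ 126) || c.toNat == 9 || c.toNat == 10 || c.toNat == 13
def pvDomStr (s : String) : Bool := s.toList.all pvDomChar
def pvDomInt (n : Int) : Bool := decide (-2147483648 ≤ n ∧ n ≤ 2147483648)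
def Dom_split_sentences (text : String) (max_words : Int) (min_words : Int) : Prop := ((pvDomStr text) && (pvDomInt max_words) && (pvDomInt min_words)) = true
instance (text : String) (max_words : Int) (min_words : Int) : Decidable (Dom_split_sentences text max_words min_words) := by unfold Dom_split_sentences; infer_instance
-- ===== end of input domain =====

-- B replaces A's stateful accumulate-and-flush inner word loop (and A's final strip-and-append-period
-- pass) with slice-based chunking filtered by chunk length, the suffix attached at join time: simpler.

-- ===== PORT A =====
-- A-side helpers: the body of A's inner word loop and of A's outer sentence loop.
def pvStepA (max_words : Int) (st : List String × List String) (word : String) :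
    List String × List String :=
  let cur := st.2 ++ [word]
  if (cur.length : Int) = max_words then
    (st.1 ++ [PySem.Str.strip (PySem.Str.join " " cur)], ([] : List String))
  else (st.1, cur)

def pvSentA (max_words : Int) (min_words : Int) (result : List String) (sentence : String) :
    List String :=
  let words := PySem.Str.split₀ (PySem.Str.strip sentence)
  if words.isEmpty then result
  else
    let st := words.foldl (pvStepA max_words) (result, ([] : List String))
    if st.2 ≠ [] ∧ min_words ≤ (st.2.length : Int) then
      st.1 ++ [PySem.Str.strip (PySem.Str.join " " st.2)]
    else st.1

def split_sentences (text : String) (max_words : Int) (min_words : Int) : List String :=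
  let sentences := (PySem.Str.split? text ".").getD []
  let result := sentences.foldl (pvSentA max_words min_words) []
  result.map (fun sent =>
    if PySem.Str.endswith text "." then PySem.Str.strip sent ++ "." else PySem.Str.strip sent)

-- ===== PORT B =====
-- B-side helpers: the chunk list of one sentence and the body of B's sentence loop.
def pvChunksB (max_words : Int) (words : List String) : List (List String) :=
  if 0 < max_words then
    (PySem.List.pyRange 0 (words.length : Int) max_words).map (fun i =>
      PySem.List.slice words (some i) (some (i + max_words)))
  else [words]

def pvSentB (max_words : Int) (min_words : Int) (suffix : String) (sentence : String) :
    List String :=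
  let words := PySem.Str.split₀ sentence
  if words.isEmpty then []
  else
    ((pvChunksB max_words words).filter (fun c =>
        decide ((c.length : Int) = max_words) || decide (min_words ≤ (c.length : Int)))).map
      (fun c => PySem.Str.join " " c ++ suffix)

def split_sentences_alt (text : String) (max_words : Int) (min_words : Int) : List String :=
  let suffix := if PySem.Str.endswith text "." then "." else ""
  ((PySem.Str.split? text ".").getD []).flatMap (pvSentB max_words min_words suffix)

-- ===== PRECONDITION & SPEC =====
def Spec_split_sentences (text : String) (max_words : Int) (min_words : Int) (out : List String) : Prop := out = split_sentences_alt text max_words min_words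
instance (text : String) (max_words : Int) (min_words : Int) (out : List String) : Decidable (Spec_split_sentences text max_words min_words out) := by unfold Spec_split_sentences; infer_instance

-- ===== CLAIM (what is proved, stated in full; the proofs are below) =====
def Claim_equal_split_sentences : Prop := ∀ (text : String) (max_words : Int) (min_words : Int), Dom_split_sentences text max_words min_words → Spec_split_sentences text max_words min_words (split_sentences text max_words min_words)

-- ===== LEMMAS AND PROOFS =====

theorem go_ok (s : List Char) : ∀ (cur : List Char) (acc : List (List Char)),
    (∀ w ∈ acc, w ≠ [] ∧ ∀ c ∈ w, PySem.Chars.isspace c = false) →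
    (∀ c ∈ cur, PySem.Chars.isspace c = false) →
    ∀ w ∈ PySem.Chars.split₀.go s cur acc, w ≠ [] ∧ ∀ c ∈ w, PySem.Chars.isspace c = false := by
  induction s with
  | nil =>
    intro cur acc hacc hcur w hw
    simp only [PySem.Chars.split₀.go] at hw
    split at hw
    · exact hacc _ (List.mem_reverse.mp hw)
    · rcases List.mem_cons.mp (List.mem_reverse.mp hw) with h | h
      · rename_i hne
        subst h
        refine ⟨by simpa using (by simpa [List.isEmpty_iff] using hne : cur ≠ []), ?_⟩
        intro c hc; exact hcur c (List.mem_reverse.mp hc)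
      · exact hacc _ h
  | cons c rest ih =>
    intro cur acc hacc hcur w hw
    simp only [PySem.Chars.split₀.go] at hw
    split at hw
    · split at hw
      · exact ih [] acc hacc (by simp) w hw
      · rename_i hne
        refine ih [] (cur.reverse :: acc) ?_ (by simp) w hw
        intro v hv
        rcases List.mem_cons.mp hv with h | h
        · subst h
          exact ⟨by simpa using (by simpa [List.isEmpty_iff] using hne : cur ≠ []),
            fun d hd => hcur d (List.mem_reverse.mp hd)⟩
        · exact hacc _ h
    · rename_i hsp
      refine ih (c :: cur) acc hacc ?_ w hw
      intro d hd
      rcases List.mem_cons.mp hd with h | h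
      · subst h; simpa using hsp
      · exact hcur d h

theorem go_lstrip (s : List Char) : ∀ (acc : List (List Char)),
    PySem.Chars.split₀.go (s.dropWhile PySem.Chars.isspace) [] acc =
      PySem.Chars.split₀.go s [] acc := by
  induction s with
  | nil => intro acc; simp
  | cons c t ih =>
    intro acc
    by_cases h : PySem.Chars.isspace c
    · rw [List.dropWhile_cons_of_pos h, ih]
      conv_rhs => simp only [PySem.Chars.split₀.go]
      simp [h]
    · rw [List.dropWhile_cons_of_neg (by simpa using h)]

theorem go_spaces (sp : List Char) : ∀ (acc : List (List Char)),
    (∀ c ∈ sp, PySem.Chars.isspace c = true) →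
    PySem.Chars.split₀.go sp [] acc = acc.reverse := by
  induction sp with
  | nil => intro acc _; simp [PySem.Chars.split₀.go]
  | cons c t ih =>
    intro acc h
    simp only [PySem.Chars.split₀.go]
    rw [if_pos (h c (by simp)), if_pos (by simp)]
    exact ih acc (fun d hd => h d (by simp [hd]))

theorem go_append_spaces (t : List Char) (sp : List Char)
    (hsp : ∀ c ∈ sp, PySem.Chars.isspace c = true) :
    ∀ (cur : List Char) (acc : List (List Char)),
    PySem.Chars.split₀.go (t ++ sp) cur acc = PySem.Chars.split₀.go t cur acc := by
  induction t with
  | nil =>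
    intro cur acc
    simp only [List.nil_append]
    by_cases hc : cur = []
    · subst hc
      rw [go_spaces sp acc hsp]
      simp [PySem.Chars.split₀.go]
    · cases sp with
      | nil => rfl
      | cons c sp' =>
        simp only [PySem.Chars.split₀.go]
        rw [if_pos (hsp c (by simp)), if_neg (by simpa [List.isEmpty_iff] using hc),
          go_spaces sp' _ (fun d hd => hsp d (by simp [hd]))]
        simp [List.isEmpty_iff, hc]
  | cons c t' ih =>
    intro cur acc
    simp only [List.cons_append, PySem.Chars.split₀.go]
    split
    · split <;> rw [ih]
    · rw [ih]

theorem chars_split₀_lstrip (s : List Char) :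
    PySem.Chars.split₀ (PySem.Chars.lstrip s) = PySem.Chars.split₀ s := by
  simp only [PySem.Chars.split₀, PySem.Chars.lstrip]
  exact go_lstrip s []

theorem chars_split₀_rstrip (s : List Char) :
    PySem.Chars.split₀ (PySem.Chars.rstrip s) = PySem.Chars.split₀ s := by
  have hs : s = PySem.Chars.rstrip s ++ (s.reverse.takeWhile PySem.Chars.isspace).reverse := by
    simp only [PySem.Chars.rstrip]
    conv_lhs => rw [show s = s.reverse.reverse by simp,
      show s.reverse = s.reverse.takeWhile PySem.Chars.isspace ++
        s.reverse.dropWhile PySem.Chars.isspace from (List.takeWhile_append_dropWhile).symm]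
    rw [List.reverse_append]
  simp only [PySem.Chars.split₀]
  conv_rhs => rw [hs]
  rw [go_append_spaces]
  intro c hc
  exact List.mem_takeWhile_imp (List.mem_reverse.mp hc)

theorem chars_split₀_strip (s : List Char) :
    PySem.Chars.split₀ (PySem.Chars.strip s) = PySem.Chars.split₀ s := by
  simp only [PySem.Chars.strip]
  rw [chars_split₀_rstrip, chars_split₀_lstrip]

theorem str_split₀_strip (s : String) :
    PySem.Str.split₀ (PySem.Str.strip s) = PySem.Str.split₀ s := by
  simp only [PySem.Str.split₀, PySem.Str.toList_strip, chars_split₀_strip]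

theorem join_ne_nil (q : List Char) (rest : List (List Char)) (hq : q ≠ []) :
    PySem.Chars.join [' '] (q :: rest) ≠ [] := by
  cases rest with
  | nil => simpa [PySem.Chars.join_singleton] using hq
  | cons r t => rw [PySem.Chars.join_cons_cons]; simp [hq]

theorem join_rev_dropWhile : ∀ (parts : List (List Char)),
    (∀ p ∈ parts, p ≠ [] ∧ ∀ c ∈ p, PySem.Chars.isspace c = false) → parts ≠ [] →
    List.dropWhile PySem.Chars.isspace (PySem.Chars.join [' '] parts).reverse =
      (PySem.Chars.join [' '] parts).reverse := by
  intro parts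
  induction parts with
  | nil => intro _ h; exact absurd rfl h
  | cons p rest ih =>
    intro h _
    cases rest with
    | nil =>
      rw [PySem.Chars.join_singleton]
      obtain ⟨hp, hns⟩ := h p (by simp)
      cases hrev : p.reverse with
      | nil => exact absurd (by simpa using hrev) hp
      | cons c t =>
        rw [List.dropWhile_cons_of_neg]
        simp only [Bool.not_eq_true]
        exact hns c (List.mem_reverse.mp (hrev ▸ List.mem_cons_self))
    | cons q t =>
      rw [PySem.Chars.join_cons_cons]
      have hq := (h q (by simp)).1
      have hJ := join_ne_nil q t hq
      have hih := ih (fun r hr => h r (by simp [hr])) (by simp)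
      have hJr : (PySem.Chars.join [' '] (q :: t)).reverse ≠ [] := by simpa using hJ
      rw [List.reverse_append, List.reverse_append, List.dropWhile_append]
      simp only [List.reverse_cons, List.reverse_nil, List.nil_append]
      rw [hih, if_neg (by simpa [List.isEmpty_iff] using hJr)]

theorem chars_strip_join (parts : List (List Char))
    (h : ∀ p ∈ parts, p ≠ [] ∧ ∀ c ∈ p, PySem.Chars.isspace c = false) (hne : parts ≠ []) :
    PySem.Chars.strip (PySem.Chars.join [' '] parts) = PySem.Chars.join [' '] parts := by
  have hl : PySem.Chars.lstrip (PySem.Chars.join [' '] parts) = PySem.Chars.join [' '] parts := by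
    simp only [PySem.Chars.lstrip]
    cases parts with
    | nil => exact absurd rfl hne
    | cons p rest =>
      obtain ⟨hp, hns⟩ := h p (by simp)
      have hshape : ∃ r, PySem.Chars.join [' '] (p :: rest) = p ++ r := by
        cases rest with
        | nil => exact ⟨[], by simp [PySem.Chars.join_singleton]⟩
        | cons q t => exact ⟨[' '] ++ PySem.Chars.join [' '] (q :: t),
            by rw [PySem.Chars.join_cons_cons]; simp⟩
      obtain ⟨r, hr⟩ := hshape
      rw [hr]
      cases p with
      | nil => exact absurd rfl hp
      | cons c p' =>
        rw [List.cons_append, List.dropWhile_cons_of_neg]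
        simp only [Bool.not_eq_true]
        exact hns c (by simp)
  simp only [PySem.Chars.strip, hl, PySem.Chars.rstrip]
  rw [join_rev_dropWhile parts h hne, List.reverse_reverse]

theorem str_strip_join (c : List String) (hne : c ≠ [])
    (h : ∀ w ∈ c, w.toList ≠ [] ∧ ∀ ch ∈ w.toList, PySem.Chars.isspace ch = false) :
    PySem.Str.strip (PySem.Str.join " " c) = PySem.Str.join " " c := by
  rw [← String.toList_inj, PySem.Str.toList_strip, PySem.Str.toList_join]
  have : (" " : String).toList = [' '] := rfl
  rw [this]
  refine chars_strip_join _ ?_ (by simpa using hne)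
  intro p hp
  obtain ⟨w, hw, rfl⟩ := List.mem_map.mp hp
  exact h w hw

theorem str_split₀_ok (s : String) :
    ∀ w ∈ PySem.Str.split₀ s, w.toList ≠ [] ∧ ∀ c ∈ w.toList, PySem.Chars.isspace c = false := by
  intro w hw
  have : w.toList ∈ PySem.Chars.split₀ s.toList := by
    rw [← PySem.Str.split₀_map_toList]
    exact List.mem_map_of_mem hw
  exact go_ok s.toList [] [] (by simp) (by simp) w.toList this

def pvSplitW (m : Nat) (ws : List String) : List (List String) × List String :=
  if h : m = 0 ∨ ws.length < m then ([], ws)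
  else
    let p := pvSplitW m (ws.drop m)
    (ws.take m :: p.1, p.2)
termination_by ws.length
decreasing_by simp only [List.length_drop]; omega

theorem foldA_shift (mw : Int) : ∀ (ws : List String) (res cur : List String),
    ws.foldl (pvStepA mw) (res, cur) =
      (res ++ (ws.foldl (pvStepA mw) ([], cur)).1, (ws.foldl (pvStepA mw) ([], cur)).2) := by
  intro ws
  induction ws with
  | nil => intro res cur; simp
  | cons w t ih =>
    intro res cur
    simp only [List.foldl_cons]
    by_cases h : ((cur ++ [w]).length : Int) = mw
    · simp only [pvStepA, if_pos h]
      rw [ih _ [], ih ([] ++ [PySem.Str.strip (PySem.Str.join " " (cur ++ [w]))]) []]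
      simp
    · simp only [pvStepA, if_neg h]
      exact ih res (cur ++ [w])

theorem foldA_nonpos (mw : Int) (hm : mw ≤ 0) : ∀ (ws res cur : List String),
    ws.foldl (pvStepA mw) (res, cur) = (res, cur ++ ws) := by
  intro ws
  induction ws with
  | nil => intro res cur; simp
  | cons w t ih =>
    intro res cur
    simp only [List.foldl_cons, pvStepA]
    rw [if_neg (by
      intro hh
      have : 1 ≤ (cur ++ [w]).length := by simp
      omega)]
    rw [ih res (cur ++ [w])]
    simp

theorem foldA_first (m : Nat) (hm : 0 < m) : ∀ (ws : List String) (res cur : List String),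
    cur.length < m →
    ws.foldl (pvStepA (m : Int)) (res, cur) =
      if ws.length + cur.length < m then (res, cur ++ ws)
      else (ws.drop (m - cur.length)).foldl (pvStepA (m : Int))
        (res ++ [PySem.Str.strip (PySem.Str.join " " (cur ++ ws.take (m - cur.length)))], []) := by
  intro ws
  induction ws with
  | nil =>
    intro res cur hc
    rw [if_pos (by simp only [List.length_nil]; omega)]
    simp
  | cons w t ih =>
    intro res cur hc
    simp only [List.foldl_cons, pvStepA]
    by_cases h : (((cur ++ [w]).length : Int)) = (m : Int)
    · have hlen : cur.length + 1 = m := by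
        have := h
        simp only [List.length_append, List.length_cons, List.length_nil] at this
        exact_mod_cast this
      rw [if_pos h]
      rw [if_neg (by simp only [List.length_cons]; omega)]
      have h1 : m - cur.length = 1 := by omega
      rw [h1]
      simp
    · have hlen : cur.length + 1 ≠ m := by
        intro he
        exact h (by simp only [List.length_append, List.length_cons, List.length_nil]; exact_mod_cast he)
      have hlt : (cur ++ [w]).length < m := by simp; omega
      rw [if_neg h]
      rw [ih res (cur ++ [w]) hlt]
      by_cases hsmall : t.length + (cur ++ [w]).length < m
      · rw [if_pos hsmall, if_pos (by simp at hsmall ⊢; omega)]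
        simp
      · rw [if_neg hsmall, if_neg (by simp at hsmall ⊢; omega)]
        have hk : m - cur.length = (m - (cur ++ [w]).length) + 1 := by simp; omega
        rw [hk, List.drop_succ_cons, List.take_succ_cons]
        simp

theorem foldA_split (m : Nat) (hm : 0 < m) : ∀ (ws res : List String),
    ws.foldl (pvStepA (m : Int)) (res, []) =
      (res ++ (pvSplitW m ws).1.map (fun c => PySem.Str.strip (PySem.Str.join " " c)),
        (pvSplitW m ws).2) := by
  intro ws
  induction hws : ws.length using Nat.strong_induction_on generalizing ws with
  | _ n ih =>
    intro res
    subst hws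
    rw [foldA_first m hm ws res [] (by simpa using hm)]
    by_cases hsmall : ws.length < m
    · rw [if_pos (by simpa using hsmall)]
      rw [pvSplitW, dif_pos (Or.inr hsmall)]
      simp
    · rw [if_neg (by simpa using hsmall)]
      simp only [List.length_nil, Nat.sub_zero, List.nil_append]
      rw [ih (ws.drop m).length (by rw [List.length_drop]; omega) (ws.drop m) rfl]
      have hunf : pvSplitW m ws =
          (ws.take m :: (pvSplitW m (ws.drop m)).1, (pvSplitW m (ws.drop m)).2) := by
        conv_lhs => rw [pvSplitW]
        rw [dif_neg (by simp only [not_or]; exact ⟨by omega, hsmall⟩)]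
      rw [hunf]
      simp

theorem pvSplitW_facts (m : Nat) (hm : 0 < m) : ∀ (ws : List String),
    (∀ c ∈ (pvSplitW m ws).1, c.length = m ∧ ∀ w ∈ c, w ∈ ws) ∧
      ((pvSplitW m ws).2.length < m ∧ ∀ w ∈ (pvSplitW m ws).2, w ∈ ws) := by
  intro ws
  induction hws : ws.length using Nat.strong_induction_on generalizing ws with
  | _ n ih =>
    subst hws
    by_cases hsmall : ws.length < m
    · rw [pvSplitW, dif_pos (Or.inr hsmall)]
      exact ⟨by simp, hsmall, fun w hw => hw⟩
    · have hunf : pvSplitW m ws =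
          (ws.take m :: (pvSplitW m (ws.drop m)).1, (pvSplitW m (ws.drop m)).2) := by
        conv_lhs => rw [pvSplitW]
        rw [dif_neg (by simp only [not_or]; exact ⟨by omega, hsmall⟩)]
      obtain ⟨ih1, ih2, ih3⟩ := ih (ws.drop m).length (by rw [List.length_drop]; omega) (ws.drop m) rfl
      rw [hunf]
      refine ⟨?_, ih2, fun w hw => List.mem_of_mem_drop (ih3 w hw)⟩
      intro c hc
      rcases List.mem_cons.mp hc with h | h
      · subst h
        exact ⟨by rw [List.length_take]; omega, fun w hw => List.mem_of_mem_take hw⟩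
      · obtain ⟨h1, h2⟩ := ih1 c h
        exact ⟨h1, fun w hw => List.mem_of_mem_drop (h2 w hw)⟩

theorem pyRange_pos_shift (mw : Int) (hm : 0 < mw) (len : Nat) (hl : 0 < len) :
    PySem.List.pyRange 0 (len : Int) mw =
      0 :: (PySem.List.pyRange 0 ((len : Int) - mw) mw).map (· + mw) := by
  rw [PySem.List.pyRange_of_pos, PySem.List.pyRange_of_pos _ _ hm]
  have hcnt : (if (0 : Int) < (len : Int) then ((((len : Int)) - 0 + mw - 1) / mw).toNat else 0) =
      (if (0 : Int) < (len : Int) - mw then ((((len : Int) - mw) - 0 + mw - 1) / mw).toNat else 0) + 1 := by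
    rw [if_pos (by exact_mod_cast hl)]
    by_cases h : (0 : Int) < (len : Int) - mw
    · rw [if_pos h]
      have he : ((len : Int)) - 0 + mw - 1 = (((len : Int) - mw) - 0 + mw - 1) + 1 * mw := by ring
      rw [he, Int.add_mul_ediv_right _ _ (by omega)]
      have hnn : 0 ≤ (((len : Int) - mw) - 0 + mw - 1) / mw :=
        Int.ediv_nonneg (by omega) (by omega)
      omega
    · rw [if_neg h]
      have h1 : ((len : Int)) - 0 + mw - 1 = ((len : Int) - 1) + 1 * mw := by ring
      rw [h1, Int.add_mul_ediv_right _ _ (by omega)]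
      rw [Int.ediv_eq_zero_of_lt (by omega) (by omega)]
      rfl
  rw [hcnt, List.range_succ_eq_map]
  simp only [List.map_cons, List.map_map]
  refine List.cons_eq_cons.mpr ⟨by simp, ?_⟩
  · apply List.map_congr_left
    intro k _
    simp only [Function.comp_apply, Nat.succ_eq_add_one]
    push_cast
    ring
  · exact hm

theorem chunksB_split (mw : Int) (hm : 0 < mw) : ∀ (ws : List String),
    pvChunksB mw ws = (pvSplitW mw.toNat ws).1 ++
      (if (pvSplitW mw.toNat ws).2.isEmpty then [] else [(pvSplitW mw.toNat ws).2]) := by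
  have hmn : 0 < mw.toNat := by omega
  intro ws
  induction hws : ws.length using Nat.strong_induction_on generalizing ws with
  | _ n ih =>
    subst hws
    rcases List.eq_nil_or_concat ws with hnil | _
    · subst hnil
      rw [pvChunksB, if_pos hm, PySem.List.pyRange_of_pos _ _ hm]
      rw [pvSplitW, dif_pos (Or.inr (by simpa using hmn))]
      simp
    · have hlen : 0 < ws.length := by
        rename_i h; obtain ⟨a, b, rfl⟩ := h; simp
      rw [pvChunksB, if_pos hm, pyRange_pos_shift mw hm ws.length hlen]
      simp only [List.map_cons, List.map_map]
      have hhead : PySem.List.slice ws (some 0) (some (0 + mw)) = ws.take mw.toNat := by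
        rw [PySem.List.slice_toNat ws le_rfl (by omega)]
        simp
      have htail : List.map ((fun i => PySem.List.slice ws (some i) (some (i + mw))) ∘ (· + mw))
            (PySem.List.pyRange 0 ((ws.length : Int) - mw) mw) =
          List.map (fun i => PySem.List.slice (ws.drop mw.toNat) (some i) (some (i + mw)))
            (PySem.List.pyRange 0 ((ws.length : Int) - mw) mw) := by
        apply List.map_congr_left
        intro i hi
        obtain ⟨h0, hlt, _⟩ := (PySem.List.mem_pyRange_iff_of_pos hm i).mp hi
        simp only [Function.comp_apply]
        rw [PySem.List.slice_toNat ws (by omega) (by omega),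
          PySem.List.slice_toNat (ws.drop mw.toNat) (by omega) (by omega),
          List.drop_drop]
        have e1 : (i + mw).toNat = mw.toNat + i.toNat := by omega
        have e2 : (i + mw + mw).toNat - (i + mw).toNat = (i + mw).toNat - i.toNat := by omega
        rw [e2, e1]
      rw [hhead, htail]
      by_cases hlt : ws.length < mw.toNat
      · have hrange : PySem.List.pyRange 0 ((ws.length : Int) - mw) mw = [] := by
          rw [PySem.List.pyRange_of_pos _ _ hm, if_neg (by omega)]
          simp
        rw [hrange]
        rw [pvSplitW, dif_pos (Or.inr hlt)]
        rw [List.take_of_length_le (by omega)]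
        have : ws.isEmpty = false := by
          cases ws
          · simp at hlen
          · rfl
        simp [this]
      · have hbound : ((ws.length : Int) - mw) = (((ws.drop mw.toNat).length : Nat) : Int) := by
          rw [List.length_drop]; omega
        rw [hbound]
        have hrec : List.map (fun i => PySem.List.slice (ws.drop mw.toNat) (some i) (some (i + mw)))
            (PySem.List.pyRange 0 (((ws.drop mw.toNat).length : Nat) : Int) mw) =
            pvChunksB mw (ws.drop mw.toNat) := by
          rw [pvChunksB, if_pos hm]
        rw [hrec, ih (ws.drop mw.toNat).length (by rw [List.length_drop]; omega) _ rfl]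
        have hunf : pvSplitW mw.toNat ws =
            (ws.take mw.toNat :: (pvSplitW mw.toNat (ws.drop mw.toNat)).1,
              (pvSplitW mw.toNat (ws.drop mw.toNat)).2) := by
          conv_lhs => rw [pvSplitW]
          rw [dif_neg (by simp only [not_or]; exact ⟨by omega, hlt⟩)]
        rw [hunf]
        simp


theorem fapp (ew : Bool) (x : String) :
    (if ew then PySem.Str.strip x ++ "." else PySem.Str.strip x) =
      PySem.Str.strip x ++ (if ew then "." else "") := by
  cases ew <;> simp

theorem sent_eq (mw mn : Int) (ew : Bool) (s : String) :
    (pvSentA mw mn [] s).map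
        (fun sent => if ew then PySem.Str.strip sent ++ "." else PySem.Str.strip sent) =
      pvSentB mw mn (if ew then "." else "") s := by
  have hOK := str_split₀_ok s
  simp only [pvSentA, pvSentB]
  rw [str_split₀_strip]
  by_cases hemp : (PySem.Str.split₀ s).isEmpty
  · rw [if_pos hemp, if_pos hemp]; rfl
  · rw [if_neg hemp, if_neg hemp]
    have hwne : PySem.Str.split₀ s ≠ [] := by simpa [List.isEmpty_iff] using hemp
    have hchunk : ∀ c : List String, c ≠ [] → (∀ w ∈ c, w ∈ PySem.Str.split₀ s) →
        (if ew then PySem.Str.strip (PySem.Str.strip (PySem.Str.join " " c)) ++ "."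
          else PySem.Str.strip (PySem.Str.strip (PySem.Str.join " " c))) =
        PySem.Str.join " " c ++ (if ew then "." else "") := by
      intro c hcne hmem
      have hsj : PySem.Str.strip (PySem.Str.join " " c) = PySem.Str.join " " c :=
        str_strip_join c hcne (fun w hw => hOK w (hmem w hw))
      rw [fapp, hsj, hsj]
    by_cases hpos : 0 < mw
    · have hmt : ((mw.toNat : Nat) : Int) = mw := by omega
      have hmn0 : 0 < mw.toNat := by omega
      rw [show pvStepA mw = pvStepA ((mw.toNat : Nat) : Int) by rw [hmt]]
      rw [foldA_split mw.toNat hmn0 _ []]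
      obtain ⟨hfull, hrlen, hrmem⟩ := pvSplitW_facts mw.toNat hmn0 (PySem.Str.split₀ s)
      rw [chunksB_split mw hpos]
      rw [List.filter_append]
      have hfilter1 : ((pvSplitW mw.toNat (PySem.Str.split₀ s)).1.filter (fun c =>
          decide ((c.length : Int) = mw) || decide (mn ≤ (c.length : Int)))) =
          (pvSplitW mw.toNat (PySem.Str.split₀ s)).1 := by
        apply List.filter_eq_self.mpr
        intro c hc
        have := (hfull c hc).1
        simp only [Bool.or_eq_true, decide_eq_true_eq]
        left; omega
      rw [hfilter1]
      simp only [List.nil_append]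
      set rem := (pvSplitW mw.toNat (PySem.Str.split₀ s)).2 with hrem
      set chunks := (pvSplitW mw.toNat (PySem.Str.split₀ s)).1 with hchunks
      have hmapchunks : (chunks.map (fun c => PySem.Str.strip (PySem.Str.join " " c))).map
          (fun sent => if ew then PySem.Str.strip sent ++ "." else PySem.Str.strip sent) =
          chunks.map (fun c => PySem.Str.join " " c ++ (if ew then "." else "")) := by
        rw [List.map_map]
        apply List.map_congr_left
        intro c hc
        exact hchunk c (by have := (hfull c hc).1; intro h; subst h; simp at this; omega)
          (fun w hw => (hfull c hc).2 w hw)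
      by_cases hre : rem = []
      · rw [if_neg (by simp [hre])]
        rw [hre]
        simp only [List.isEmpty_nil, if_true, List.append_nil, List.filter_nil]
        exact hmapchunks
      · rw [show rem.isEmpty = false by simpa [List.isEmpty_iff] using hre]
        simp only [Bool.false_eq_true, if_false]
        have hrfilter : ([rem].filter (fun c =>
            decide ((c.length : Int) = mw) || decide (mn ≤ (c.length : Int)))) =
            if mn ≤ (rem.length : Int) then [rem] else [] := by
          simp only [List.filter_cons, List.filter_nil]
          have : decide ((rem.length : Int) = mw) = false := by
            simp only [decide_eq_false_iff_not]
            omega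
          rw [this]
          simp only [Bool.false_or]
          by_cases h : mn ≤ (rem.length : Int)
          · rw [if_pos (by simpa using h), if_pos h]
          · rw [if_neg (by simpa using h), if_neg h]
        rw [hrfilter]
        by_cases hmin : mn ≤ (rem.length : Int)
        · rw [if_pos ⟨hre, hmin⟩, if_pos hmin]
          rw [List.map_append, hmapchunks, List.map_append]
          congr 1
          simp only [List.map_cons, List.map_nil]
          rw [hchunk rem hre hrmem]
        · rw [if_neg (by tauto), if_neg hmin]
          rw [List.append_nil]
          exact hmapchunks
    · have hmw0 : mw ≤ 0 := by omega
      rw [foldA_nonpos mw hmw0 _ [] []]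
      simp only [List.nil_append]
      rw [pvChunksB, if_neg hpos]
      have hlen1 : 1 ≤ (PySem.Str.split₀ s).length := by
        cases h : PySem.Str.split₀ s
        · exact absurd h hwne
        · simp
      have hpredw : (decide (((PySem.Str.split₀ s).length : Int) = mw) ||
          decide (mn ≤ ((PySem.Str.split₀ s).length : Int))) =
          decide (mn ≤ ((PySem.Str.split₀ s).length : Int)) := by
        have : decide (((PySem.Str.split₀ s).length : Int) = mw) = false := by
          simp only [decide_eq_false_iff_not]
          omega
        rw [this, Bool.false_or]
      simp only [List.filter_cons, List.filter_nil, hpredw]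
      by_cases hmin : mn ≤ ((PySem.Str.split₀ s).length : Int)
      · rw [if_pos ⟨hwne, hmin⟩,
          if_pos (show decide (mn ≤ ((PySem.Str.split₀ s).length : Int)) = true by
            simpa using hmin)]
        simp only [List.map_cons, List.map_nil]
        rw [hchunk _ hwne (fun w hw => hw)]
      · rw [if_neg (show ¬(PySem.Str.split₀ s ≠ [] ∧ mn ≤ ((PySem.Str.split₀ s).length : Int)) by
            tauto),
          if_neg (show ¬(decide (mn ≤ ((PySem.Str.split₀ s).length : Int)) = true) by
            simpa using hmin)]
        rfl

theorem sentA_shift (mw mn : Int) (res : List String) (s : String) :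
    pvSentA mw mn res s = res ++ pvSentA mw mn [] s := by
  simp only [pvSentA]
  by_cases hemp : (PySem.Str.split₀ (PySem.Str.strip s)).isEmpty
  · rw [if_pos hemp, if_pos hemp, List.append_nil]
  · rw [if_neg hemp, if_neg hemp]
    rw [foldA_shift mw _ res []]
    generalize (PySem.Str.split₀ (PySem.Str.strip s)).foldl (pvStepA mw)
      (([] : List String), ([] : List String)) = st
    split_ifs with h
    · rw [List.append_assoc]
    · rfl

theorem foldSent_flatMap (mw mn : Int) : ∀ (L : List String) (res : List String),
    L.foldl (pvSentA mw mn) res = res ++ L.flatMap (pvSentA mw mn []) := by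
  intro L
  induction L with
  | nil => intro res; simp
  | cons s t ih =>
    intro res
    simp only [List.foldl_cons, List.flatMap_cons]
    rw [sentA_shift mw mn res s, ih, List.append_assoc]


theorem flatMap_ext {α β : Type} (f g : α → List β) (h : ∀ x, f x = g x) :
    ∀ l : List α, l.flatMap f = l.flatMap g := by
  intro l
  induction l with
  | nil => rfl
  | cons x t ih => simp only [List.flatMap_cons, h x, ih]

theorem main_eq (text : String) (mw mn : Int) :
    split_sentences text mw mn = split_sentences_alt text mw mn := by
  simp only [split_sentences, split_sentences_alt]
  rw [foldSent_flatMap mw mn _ [], List.nil_append, List.map_flatMap]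
  exact flatMap_ext _ _ (fun s => sent_eq mw mn (PySem.Str.endswith text ".") s) _

-- ===== VERDICT (by name: the statement is the Claim_ definition above) =====
theorem split_sentences_spec : Claim_equal_split_sentences := by
  intro text max_words min_words _
  unfold Spec_split_sentences
  exact main_eq text max_words min_words
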